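-- pv_equiv track=rewrite | github.com/trueneu/fbhc2021 | a1.py | solve
-- ===== SOURCE A (Python) =====
-- from collections import Counter
--
-- def is_vowel(c):
--     if c in {'A', 'E', 'I', 'O', 'U'}:
--         return True
--     return False
--
-- def solve(s):
--     counter = Counter(s)
--     most_frequent_vowel = most_frequent_consonant = ''
--     max_freq_consonant = 0
--     max_freq_vowel = 0
--
--     for char, freq in counter.items():
--         if is_vowel(char):
--             if max_freq_vowel < freq:
--                 max_freq_vowel = freq
--                 most_frequent_vowel = char
--         else:
--             if max_freq_consonant < freq:
--                 max_freq_consonant = freq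
--                 most_frequent_consonant = char
--
--     vowel_swaps_count = 0
--     for char in s:
--         if char == most_frequent_vowel:
--             pass
--         elif is_vowel(char):
--             vowel_swaps_count += 2
--         else:
--             vowel_swaps_count += 1
--
--     consonant_swaps_count = 0
--     for char in s:
--         if char == most_frequent_consonant:
--             pass
--         elif not is_vowel(char):
--             consonant_swaps_count += 2
--         else:
--             consonant_swaps_count += 1
--
--     return min(vowel_swaps_count, consonant_swaps_count)
-- ===== SOURCE B (Python) =====
-- from collections import Counter
--
-- def solve(s):
--     V = C = mv = mc = 0
--     for ch, f in Counter(s).items():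
--         if ch in 'AEIOU':
--             V += f
--             if f > mv:
--                 mv = f
--         else:
--             C += f
--             if f > mc:
--                 mc = f
--     return min(2 * (V - mv) + C, 2 * (C - mc) + V)
-- ===== Notes on version B (the rewrite author's own statement) =====
-- stated objective: faster
-- what changed: The two full rescans of s that tally vowel/consonant swap costs are replaced by a closed-form formula min(2*(V-mv)+C, 2*(C-mc)+V) computed from one pass over Counter(s).items().
import Mathlib
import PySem

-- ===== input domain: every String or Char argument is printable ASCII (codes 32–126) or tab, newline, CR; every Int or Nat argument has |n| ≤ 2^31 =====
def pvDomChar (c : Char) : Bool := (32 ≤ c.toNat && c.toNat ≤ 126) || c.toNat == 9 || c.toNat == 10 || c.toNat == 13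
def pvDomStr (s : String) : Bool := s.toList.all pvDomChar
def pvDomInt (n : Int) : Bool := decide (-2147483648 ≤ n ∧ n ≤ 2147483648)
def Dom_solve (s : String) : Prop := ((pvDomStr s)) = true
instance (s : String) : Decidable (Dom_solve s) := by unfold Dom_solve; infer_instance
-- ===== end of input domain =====

-- B replaces A's two full rescans of s by a closed-form formula min(2*(V-mv)+C, 2*(C-mc)+V)
-- computed from one pass over the counter's items (objective: faster by a constant factor).

-- ===== PORT A =====
def isVowel (c : Char) : Bool := ['A', 'E', 'I', 'O', 'U'].contains c

-- most_frequent_vowel/consonant start as '' in Python, which never equals a 1-char string: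
-- modelled as Option Char starting at none.
def solve (s : String) : Int :=
  let l := s.toList
  let counter := PySem.Dict.counter l
  let st := counter.items.foldl
    (fun (st : Option Char × Option Char × Int × Int) p =>
      if isVowel p.1 then
        (if st.2.2.1 < p.2 then (some p.1, st.2.1, p.2, st.2.2.2) else st)
      else
        (if st.2.2.2 < p.2 then (st.1, some p.1, st.2.2.1, p.2) else st))
    (none, none, 0, 0)
  let vsw := l.foldl (fun acc c =>
      if some c == st.1 then acc
      else if isVowel c then acc + 2 else acc + 1) 0
  let csw := l.foldl (fun acc c =>
      if some c == st.2.1 then acc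
      else if !isVowel c then acc + 2 else acc + 1) 0
  min vsw csw

-- ===== PORT B =====
def isVowelB (c : Char) : Bool := "AEIOU".toList.contains c

def solve_alt (s : String) : Int :=
  let st := (PySem.Dict.counter s.toList).items.foldl
    (fun (st : Int × Int × Int × Int) p =>
      if isVowelB p.1 then
        (st.1 + p.2, st.2.1, if p.2 > st.2.2.1 then p.2 else st.2.2.1, st.2.2.2)
      else
        (st.1, st.2.1 + p.2, st.2.2.1, if p.2 > st.2.2.2 then p.2 else st.2.2.2))
    (0, 0, 0, 0)
  min (2 * (st.1 - st.2.2.1) + st.2.1) (2 * (st.2.1 - st.2.2.2) + st.1)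

-- ===== PRECONDITION & SPEC =====
def Spec_solve (s : String) (out : Int) : Prop := out = solve_alt s
instance (s : String) (out : Int) : Decidable (Spec_solve s out) := by unfold Spec_solve; infer_instance

-- ===== CLAIM (what is proved, stated in full; the proofs are below) =====
def Claim_equal_solve : Prop := ∀ (s : String), Dom_solve s → Spec_solve s (solve s)

-- ===== LEMMAS AND PROOFS =====

lemma isVowelB_eq (c : Char) : isVowelB c = isVowel c := by
  simp [isVowelB, isVowel]

/-- running maximum of the frequencies of the keys satisfying `P` -/
def maxF (P : Char → Bool) (L : List (Char × Int)) (a : Int) : Int :=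
  L.foldl (fun m p => if P p.1 then (if m < p.2 then p.2 else m) else m) a

/-- running sum of the frequencies of the keys satisfying `P` -/
def sumF (P : Char → Bool) (L : List (Char × Int)) (a : Int) : Int :=
  L.foldl (fun v p => if P p.1 then v + p.2 else v) a

lemma A_fold_3 (L : List (Char × Int)) :
    ∀ st : Option Char × Option Char × Int × Int,
    (L.foldl
      (fun (st : Option Char × Option Char × Int × Int) p =>
        if isVowel p.1 then
          (if st.2.2.1 < p.2 then (some p.1, st.2.1, p.2, st.2.2.2) else st)
        else
          (if st.2.2.2 < p.2 then (st.1, some p.1, st.2.2.1, p.2) else st)) st).2.2.1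
    = maxF isVowel L st.2.2.1 := by
  induction L with
  | nil => intro st; simp [maxF]
  | cons p L ih =>
    intro st
    simp only [List.foldl_cons, maxF, ih]
    by_cases hv : isVowel p.1 <;> simp [hv] <;> split_ifs <;> simp

lemma A_fold_4 (L : List (Char × Int)) :
    ∀ st : Option Char × Option Char × Int × Int,
    (L.foldl
      (fun (st : Option Char × Option Char × Int × Int) p =>
        if isVowel p.1 then
          (if st.2.2.1 < p.2 then (some p.1, st.2.1, p.2, st.2.2.2) else st)
        else
          (if st.2.2.2 < p.2 then (st.1, some p.1, st.2.2.1, p.2) else st)) st).2.2.2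
    = maxF (fun c => !isVowel c) L st.2.2.2 := by
  induction L with
  | nil => intro st; simp [maxF]
  | cons p L ih =>
    intro st
    simp only [List.foldl_cons, maxF, ih]
    by_cases hv : isVowel p.1 <;> simp [hv] <;> split_ifs <;> simp

lemma B_fold (L : List (Char × Int)) :
    ∀ st : Int × Int × Int × Int,
    L.foldl
      (fun (st : Int × Int × Int × Int) p =>
        if isVowel p.1 then
          (st.1 + p.2, st.2.1, if p.2 > st.2.2.1 then p.2 else st.2.2.1, st.2.2.2)
        else
          (st.1, st.2.1 + p.2, st.2.2.1, if p.2 > st.2.2.2 then p.2 else st.2.2.2)) st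
    = (sumF isVowel L st.1, sumF (fun c => !isVowel c) L st.2.1,
       maxF isVowel L st.2.2.1, maxF (fun c => !isVowel c) L st.2.2.2) := by
  induction L with
  | nil => intro st; simp [sumF, maxF]
  | cons p L ih =>
    intro st
    simp only [List.foldl_cons, ih]
    by_cases hv : isVowel p.1 <;> simp [sumF, maxF, hv, gt_iff_lt]

/-- invariant for A's items loop: the remembered char (when any) satisfies the class
predicate and is listed in `M` with exactly the remembered frequency. -/
def InvA (M : List (Char × Int)) (st : Option Char × Option Char × Int × Int) : Prop :=
  (st.1 = none → st.2.2.1 = 0) ∧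
  (∀ a, st.1 = some a → isVowel a = true ∧ (a, st.2.2.1) ∈ M) ∧
  (st.2.1 = none → st.2.2.2 = 0) ∧
  (∀ a, st.2.1 = some a → isVowel a = false ∧ (a, st.2.2.2) ∈ M)

lemma A_inv (M : List (Char × Int)) (L : List (Char × Int)) :
    ∀ st, (∀ p ∈ L, p ∈ M) → InvA M st →
    InvA M (L.foldl
      (fun (st : Option Char × Option Char × Int × Int) p =>
        if isVowel p.1 then
          (if st.2.2.1 < p.2 then (some p.1, st.2.1, p.2, st.2.2.2) else st)
        else
          (if st.2.2.2 < p.2 then (st.1, some p.1, st.2.2.1, p.2) else st)) st) := by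
  induction L with
  | nil => intro st _ h; simpa using h
  | cons p L ih =>
    intro st hmem hinv
    simp only [List.foldl_cons]
    refine ih _ (fun q hq => hmem q (List.mem_cons_of_mem _ hq)) ?_
    have hpM : p ∈ M := hmem p (List.mem_cons_self)
    obtain ⟨h1, h2, h3, h4⟩ := hinv
    by_cases hv : isVowel p.1 = true
    · rw [if_pos hv]
      by_cases hlt : st.2.2.1 < p.2
      · rw [if_pos hlt]
        refine ⟨by simp, ?_, h3, h4⟩
        intro a ha
        simp only [Option.some.injEq] at ha
        subst ha
        exact ⟨hv, by simpa using hpM⟩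
      · rw [if_neg hlt]; exact ⟨h1, h2, h3, h4⟩
    · rw [if_neg hv]
      by_cases hlt : st.2.2.2 < p.2
      · rw [if_pos hlt]
        refine ⟨h1, h2, by simp, ?_⟩
        intro a ha
        simp only [Option.some.injEq] at ha
        subst ha
        exact ⟨by simpa using hv, by simpa using hpM⟩
      · rw [if_neg hlt]; exact ⟨h1, h2, h3, h4⟩

lemma vsw_none (l : List Char) :
    ∀ acc : Int,
    l.foldl (fun acc c =>
        if some c == (none : Option Char) then acc
        else if isVowel c then acc + 2 else acc + 1) acc
    = acc + 2 * (l.countP isVowel : Int) + (l.countP (fun c => !isVowel c) : Int) := by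
  induction l with
  | nil => intro acc; simp
  | cons c l ih =>
    intro acc
    simp only [List.foldl_cons]
    rw [ih]
    simp only [List.countP_cons]
    by_cases hv : isVowel c = true <;> simp [hv] <;> ring

lemma vsw_some (a : Char) (ha : isVowel a = true) (l : List Char) :
    ∀ acc : Int,
    l.foldl (fun acc c =>
        if some c == some a then acc
        else if isVowel c then acc + 2 else acc + 1) acc
    = acc + 2 * (l.countP isVowel : Int) + (l.countP (fun c => !isVowel c) : Int)
        - 2 * (l.count a : Int) := by
  induction l with
  | nil => intro acc; simp
  | cons c l ih =>
    intro acc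
    simp only [List.foldl_cons]
    rw [ih]
    simp only [List.countP_cons, List.count_cons]
    by_cases hc : c = a
    · subst hc; simp [ha]; ring
    · by_cases hv : isVowel c = true <;> simp [hc, hv] <;> ring

lemma csw_none (l : List Char) :
    ∀ acc : Int,
    l.foldl (fun acc c =>
        if some c == (none : Option Char) then acc
        else if !isVowel c then acc + 2 else acc + 1) acc
    = acc + 2 * (l.countP (fun c => !isVowel c) : Int) + (l.countP isVowel : Int) := by
  induction l with
  | nil => intro acc; simp
  | cons c l ih =>
    intro acc
    simp only [List.foldl_cons]
    rw [ih]
    simp only [List.countP_cons]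
    by_cases hv : isVowel c = true <;> simp [hv] <;> ring

lemma csw_some (a : Char) (ha : isVowel a = false) (l : List Char) :
    ∀ acc : Int,
    l.foldl (fun acc c =>
        if some c == some a then acc
        else if !isVowel c then acc + 2 else acc + 1) acc
    = acc + 2 * (l.countP (fun c => !isVowel c) : Int) + (l.countP isVowel : Int)
        - 2 * (l.count a : Int) := by
  induction l with
  | nil => intro acc; simp
  | cons c l ih =>
    intro acc
    simp only [List.foldl_cons]
    rw [ih]
    simp only [List.countP_cons, List.count_cons]
    by_cases hc : c = a
    · subst hc; simp [ha]; ring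
    · by_cases hv : isVowel c = true <;> simp [hc, hv] <;> ring

lemma sumF_eq_sum (P : Char → Bool) (L : List (Char × Int)) :
    ∀ acc : Int, sumF P L acc = acc + ((L.filter (fun p => P p.1)).map (·.2)).sum := by
  induction L with
  | nil => intro acc; simp [sumF]
  | cons p L ih =>
    intro acc
    rw [show sumF P (p :: L) acc = sumF P L (if P p.1 then acc + p.2 else acc) from rfl, ih]
    by_cases hp : P p.1 = true <;> simp [hp]
    ring

lemma mem_items_counter (l : List Char) (a : Char) (m : Int)
    (h : (a, m) ∈ (PySem.Dict.counter l).items) : m = (l.count a : Int) := by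
  rw [PySem.Dict.items_counter] at h
  simp only [List.mem_map] at h
  obtain ⟨k, _, hk⟩ := h
  cases hk
  rfl

lemma sumF_counter (P : Char → Bool) (l : List Char) :
    sumF P (PySem.Dict.counter l).items 0 = (l.countP P : Int) := by
  rw [sumF_eq_sum, PySem.Dict.items_counter]
  have hperm : List.Perm (PySem.Set.ofList l) l.dedup := by
    rw [List.perm_ext_iff_of_nodup (PySem.Set.nodup_ofList l) l.nodup_dedup]
    intro a
    simp [PySem.Set.mem_ofList, List.mem_dedup]
  have hmaps : ((((PySem.Set.ofList l).map
        (fun k => (k, (l.count k : Int)))).filter (fun p => P p.1)).map (·.2))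
      = ((PySem.Set.ofList l).filter P).map (fun k => (l.count k : Int)) := by
    rw [List.filter_map, List.map_map]
    rfl
  rw [hmaps]
  have hperm2 : List.Perm (((PySem.Set.ofList l).filter P).map (fun k => (l.count k : Int)))
      ((l.dedup.filter P).map (fun k => (l.count k : Int))) :=
    (hperm.filter P).map _
  rw [hperm2.sum_eq]
  have hc : (l.dedup.filter P).map (fun k => (l.count k : Int))
      = ((l.dedup.filter P).map l.count).map (Nat.cast : ℕ → ℤ) := by
    rw [List.map_map]; rfl
  rw [hc, ← Nat.cast_list_sum, List.sum_map_count_dedup_filter_eq_countP]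
  ring

-- ===== VERDICT (by name: the statement is the Claim_ definition above) =====
theorem solve_spec : Claim_equal_solve := by
  intro s _
  unfold Spec_solve solve solve_alt
  simp only [isVowelB_eq]
  set l := s.toList with hl
  set L := (PySem.Dict.counter l).items with hL
  rw [B_fold]
  have hinv : InvA L (L.foldl
      (fun (st : Option Char × Option Char × Int × Int) p =>
        if isVowel p.1 then
          (if st.2.2.1 < p.2 then (some p.1, st.2.1, p.2, st.2.2.2) else st)
        else
          (if st.2.2.2 < p.2 then (st.1, some p.1, st.2.2.1, p.2) else st))
      (none, none, 0, 0)) :=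
    A_inv L L _ (fun _ h => h) (by simp [InvA])
  have h3 := A_fold_3 L (none, none, 0, 0)
  have h4 := A_fold_4 L (none, none, 0, 0)
  set st := L.foldl
      (fun (st : Option Char × Option Char × Int × Int) p =>
        if isVowel p.1 then
          (if st.2.2.1 < p.2 then (some p.1, st.2.1, p.2, st.2.2.2) else st)
        else
          (if st.2.2.2 < p.2 then (st.1, some p.1, st.2.2.1, p.2) else st))
      (none, none, 0, 0) with hst
  obtain ⟨i1, i2, i3, i4⟩ := hinv
  have hV : sumF isVowel L 0 = (l.countP isVowel : Int) := sumF_counter _ l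
  have hC : sumF (fun c => !isVowel c) L 0 = (l.countP (fun c => !isVowel c) : Int) :=
    sumF_counter _ l
  have hvsw : l.foldl (fun acc c =>
      if some c == st.1 then acc
      else if isVowel c then acc + 2 else acc + 1) 0
      = 2 * (l.countP isVowel : Int) + (l.countP (fun c => !isVowel c) : Int)
        - 2 * st.2.2.1 := by
    cases hmf : st.1 with
    | none =>
      have := i1 hmf
      rw [vsw_none l 0, this]; ring
    | some a =>
      obtain ⟨hva, hmem⟩ := i2 a hmf
      have := mem_items_counter l a st.2.2.1 (by rwa [← hL])
      rw [vsw_some a hva l 0, ← this]; ring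
  have hcsw : l.foldl (fun acc c =>
      if some c == st.2.1 then acc
      else if !isVowel c then acc + 2 else acc + 1) 0
      = 2 * (l.countP (fun c => !isVowel c) : Int) + (l.countP isVowel : Int)
        - 2 * st.2.2.2 := by
    cases hmf : st.2.1 with
    | none =>
      have := i3 hmf
      rw [csw_none l 0, this]; ring
    | some a =>
      obtain ⟨hva, hmem⟩ := i4 a hmf
      have := mem_items_counter l a st.2.2.2 (by rwa [← hL])
      rw [csw_some a hva l 0, ← this]; ring
  rw [hvsw, hcsw, hV, hC, h3, h4]
  congr 1 <;> ring
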